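-- pv_equiv track=rewrite | github.com/CrowdingFaun624/Advent-of-Code-2023 | Day 2/Day2.py | get_possible_game_ids
-- ===== SOURCE A (Python) =====
-- def get_possible_game_ids(games:dict[int,list[tuple[int,int,int]]], maximum_allowed:tuple[int,int,int]) -> list[int]:
--     '''Returns a list of game ids for games which have all rounds under their maximum values.'''
--     output:list[int] = []
--     for game_id, game_rounds in games.items():
--         game_is_possible = True
--         for round_index, round in enumerate(game_rounds):
--             for round_amount, max_amount in zip(round, maximum_allowed):
--                 if round_amount > max_amount:
--                     game_is_possible = False
--                     break
--             if not game_is_possible: break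
--         if game_is_possible:
--             output.append(game_id)
--     return output
-- ===== SOURCE B (Python) =====
-- def get_possible_game_ids(games:dict[int,list[tuple[int,int,int]]], maximum_allowed:tuple[int,int,int]) -> list[int]:
--     '''Returns a list of game ids for games which have all rounds under their maximum values.'''
--     max_r, max_g, max_b = maximum_allowed
--     output = []
--     for game_id, rounds in games.items():
--         if not rounds or (max(r for r, _, _ in rounds) <= max_r
--                           and max(g for _, g, _ in rounds) <= max_g
--                           and max(b for _, _, b in rounds) <= max_b):
--             output.append(game_id)
--     return output
-- ===== Notes on version B (the rewrite author's own statement) =====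
-- stated objective: simpler
-- what changed: Replaces the nested flag-and-break loops by a per-game column-maximum test: a game is kept iff it has no rounds or the maximum of each colour column is <= the corresponding allowed value.
import Mathlib
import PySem

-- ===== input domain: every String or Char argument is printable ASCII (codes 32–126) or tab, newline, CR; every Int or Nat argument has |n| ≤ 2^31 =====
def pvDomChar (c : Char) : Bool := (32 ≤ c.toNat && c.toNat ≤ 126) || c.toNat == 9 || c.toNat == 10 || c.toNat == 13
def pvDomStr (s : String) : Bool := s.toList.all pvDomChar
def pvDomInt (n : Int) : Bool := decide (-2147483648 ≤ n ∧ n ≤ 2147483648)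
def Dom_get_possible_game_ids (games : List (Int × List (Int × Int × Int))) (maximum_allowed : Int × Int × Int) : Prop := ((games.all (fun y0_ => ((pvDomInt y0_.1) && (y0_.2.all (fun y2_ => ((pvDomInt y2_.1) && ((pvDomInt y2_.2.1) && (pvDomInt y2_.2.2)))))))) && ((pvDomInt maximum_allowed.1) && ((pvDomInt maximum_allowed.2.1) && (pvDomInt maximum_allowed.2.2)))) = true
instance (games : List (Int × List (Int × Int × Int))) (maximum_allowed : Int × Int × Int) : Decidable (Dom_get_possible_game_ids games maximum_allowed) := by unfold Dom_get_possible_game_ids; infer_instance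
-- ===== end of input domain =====

-- B replaces A's nested flag-and-break loops by a per-game column-maximum test (simpler decomposition).

-- ===== PORT A =====
-- inner loop: 'for round_amount, max_amount in zip(round, maximum_allowed)' with break on violation
def pvInnerLoop : List (Int × Int) → Bool
  | [] => true
  | (a, m) :: rest => if a > m then false else pvInnerLoop rest

-- outer loop over rounds with 'if not game_is_possible: break'
def pvOuterLoop (ma : Int × Int × Int) : List (Int × Int × Int) → Bool
  | [] => true
  | r :: rest =>
      if pvInnerLoop [(r.1, ma.1), (r.2.1, ma.2.1), (r.2.2, ma.2.2)] then pvOuterLoop ma rest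
      else false

def get_possible_game_ids (games : List (Int × List (Int × Int × Int))) (maximum_allowed : Int × Int × Int) : List Int :=
  games.foldl (fun output p => if pvOuterLoop maximum_allowed p.2 then output ++ [p.1] else output) []

-- ===== PORT B =====
-- 'not rounds or (max(column) <= limit for each of the three columns)'
def pvAltOk (ma : Int × Int × Int) (rounds : List (Int × Int × Int)) : Bool :=
  rounds.isEmpty ||
    (match PySem.List.max? (rounds.map (·.1)) (fun x => x),
           PySem.List.max? (rounds.map (·.2.1)) (fun x => x),
           PySem.List.max? (rounds.map (·.2.2)) (fun x => x) with
     | some r, some g, some b => decide (r ≤ ma.1) && decide (g ≤ ma.2.1) && decide (b ≤ ma.2.2)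
     | _, _, _ => false)

def get_possible_game_ids_alt (games : List (Int × List (Int × Int × Int))) (maximum_allowed : Int × Int × Int) : List Int :=
  (games.filter (fun p => pvAltOk maximum_allowed p.2)).map Prod.fst

-- ===== PRECONDITION & SPEC =====
def Spec_get_possible_game_ids (games : List (Int × List (Int × Int × Int))) (maximum_allowed : Int × Int × Int) (out : List Int) : Prop := out = get_possible_game_ids_alt games maximum_allowed
instance (games : List (Int × List (Int × Int × Int))) (maximum_allowed : Int × Int × Int) (out : List Int) : Decidable (Spec_get_possible_game_ids games maximum_allowed out) := by unfold Spec_get_possible_game_ids; infer_instance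

-- ===== CLAIM (what is proved, stated in full; the proofs are below) =====
def Claim_equal_get_possible_game_ids : Prop := ∀ (games : List (Int × List (Int × Int × Int))) (maximum_allowed : Int × Int × Int), Dom_get_possible_game_ids games maximum_allowed → Spec_get_possible_game_ids games maximum_allowed (get_possible_game_ids games maximum_allowed)

-- ===== LEMMAS AND PROOFS =====

-- A's per-game check is the conjunction of per-round componentwise comparisons.
lemma outerLoop_eq_all (ma : Int × Int × Int) (rounds : List (Int × Int × Int)) :
    pvOuterLoop ma rounds
      = rounds.all (fun r => decide (r.1 ≤ ma.1) && decide (r.2.1 ≤ ma.2.1) && decide (r.2.2 ≤ ma.2.2)) := by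
  induction rounds with
  | nil => rfl
  | cons r rest ih =>
      simp only [pvOuterLoop, pvInnerLoop, List.all_cons, ih]
      by_cases h1 : r.1 ≤ ma.1 <;> by_cases h2 : r.2.1 ≤ ma.2.1 <;> by_cases h3 : r.2.2 ≤ ma.2.2 <;>
        simp [h1, h2, h3, not_lt] at *

-- running max ≤ c ↔ every element ≤ c
lemma foldl_max_le (c : Int) (t : List Int) (x : Int) :
    (t.foldl max x ≤ c) ↔ (x ≤ c ∧ ∀ y ∈ t, y ≤ c) := by
  induction t generalizing x with
  | nil => simp
  | cons a t ih =>
      rw [List.foldl_cons, ih]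
      simp only [max_le_iff, List.mem_cons]
      constructor
      · rintro ⟨⟨hx, ha⟩, ht⟩
        refine ⟨hx, ?_⟩
        rintro y (rfl | hy)
        · exact ha
        · exact ht y hy
      · rintro ⟨hx, h⟩
        exact ⟨⟨hx, h a (Or.inl rfl)⟩, fun y hy => h y (Or.inr hy)⟩

-- B's per-game check equals the same conjunction.
lemma altOk_eq_all (ma : Int × Int × Int) (rounds : List (Int × Int × Int)) :
    pvAltOk ma rounds
      = rounds.all (fun r => decide (r.1 ≤ ma.1) && decide (r.2.1 ≤ ma.2.1) && decide (r.2.2 ≤ ma.2.2)) := by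
  cases rounds with
  | nil => rfl
  | cons r rest =>
      simp only [pvAltOk, List.map_cons, PySem.List.max?_id_cons, List.isEmpty_cons, Bool.false_or,
        List.all_cons]
      rw [Bool.eq_iff_iff]
      simp only [Bool.and_eq_true, decide_eq_true_eq, List.all_eq_true,
        foldl_max_le, List.forall_mem_map]
      constructor
      · rintro ⟨⟨⟨a1, f1⟩, a2, f2⟩, a3, f3⟩
        exact ⟨⟨⟨a1, a2⟩, a3⟩, fun y hy => ⟨⟨f1 y hy, f2 y hy⟩, f3 y hy⟩⟩
      · rintro ⟨⟨⟨a1, a2⟩, a3⟩, h⟩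
        exact ⟨⟨⟨a1, fun y hy => (h y hy).1.1⟩, a2, fun y hy => (h y hy).1.2⟩,
               a3, fun y hy => (h y hy).2⟩

-- ===== VERDICT (by name: the statement is the Claim_ definition above) =====
theorem get_possible_game_ids_spec : Claim_equal_get_possible_game_ids := by
  intro games ma _
  unfold Spec_get_possible_game_ids get_possible_game_ids get_possible_game_ids_alt
  have hpred : ∀ rounds, pvOuterLoop ma rounds = pvAltOk ma rounds := fun rounds => by
    rw [outerLoop_eq_all, altOk_eq_all]
  calc games.foldl (fun output p => if pvOuterLoop ma p.2 then output ++ [p.1] else output) []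
      = games.foldl (fun output p => if pvAltOk ma p.2 then output ++ [p.1] else output) [] := by
        simp only [hpred]
    _ = [] ++ (games.filter (fun p => pvAltOk ma p.2)).map Prod.fst :=
        PySem.List.foldl_append_if _ _ _ _
    _ = (games.filter (fun p => pvAltOk ma p.2)).map Prod.fst := List.nil_append _
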